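-- pv_equiv track=rewrite | github.com/dsa110/dsa110-calib | dsacalib/utils.py | get_autobl_indices
-- ===== SOURCE A (Python) =====
-- def get_autobl_indices(nant, casa=False):
--     """Returns a list of the indices containing the autocorrelations.
--
--     Can return the index for either correlator-ordered visibilities (`casa` set
--     to ``False``) or CASA-ordered visibilities (`casa` set to ``True``).
--
--     Parameters
--     ----------
--     nant : int
--         The number of antennas in the visibility set.
--     casa : boolean
--         Whether the visibilities follow CASA ordering standards (`casa` set to
--         ``True``) or DSA-10/DSA-110 correlator ordering standards (`casa` set
--         to ``False``). Defaults to ``False``, or correlator ordering standards.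
--
--     Returns
--     -------
--     auto_bls : list
--         The list of indices in the visibilities corresponding to
--         autocorrelations.
--     """
--     auto_bls = []
--     i = -1
--     for j in range(1, nant+1):
--         i += j
--         auto_bls += [i]
--     if casa:
--         nbls = (nant*(nant+1))//2
--         auto_bls = [(nbls-1)-aidx for aidx in auto_bls]
--         auto_bls = auto_bls[::-1]
--     return auto_bls
-- ===== SOURCE B (Python) =====
-- def get_autobl_indices(nant, casa=False):
--     if casa:
--         return [m*nant - m*(m-1)//2 for m in range(nant)]
--     return [j*(j+1)//2 - 1 for j in range(1, nant+1)]
-- ===== Notes on version B (the rewrite author's own statement) =====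
-- stated objective: simpler
-- what changed: Replaced the running-sum loop plus subtract-and-reverse post-pass by direct closed-form comprehensions: triangular numbers j*(j+1)//2-1 for correlator order, and cumulative counts m*nant-m*(m-1)//2 computed directly for CASA order.
import Mathlib
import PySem

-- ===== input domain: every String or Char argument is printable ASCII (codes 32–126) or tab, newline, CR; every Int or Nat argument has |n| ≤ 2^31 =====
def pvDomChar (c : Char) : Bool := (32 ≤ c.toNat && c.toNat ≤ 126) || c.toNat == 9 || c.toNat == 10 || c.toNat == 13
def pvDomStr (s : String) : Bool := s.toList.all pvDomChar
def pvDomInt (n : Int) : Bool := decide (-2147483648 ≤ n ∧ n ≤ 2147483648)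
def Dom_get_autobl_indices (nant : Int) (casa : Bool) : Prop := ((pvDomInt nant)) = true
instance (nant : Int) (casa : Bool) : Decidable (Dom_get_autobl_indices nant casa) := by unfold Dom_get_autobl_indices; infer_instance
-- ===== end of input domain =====

-- B replaces A's running-sum loop and subtract-and-reverse post-pass with direct
-- closed-form comprehensions (simpler); return values proved equal everywhere.

-- ===== PORT A =====
def get_autobl_indices (nant : Int) (casa : Bool) : List Int :=
  -- auto_bls = []; i = -1; for j in range(1, nant+1): i += j; auto_bls += [i]
  let st := (PySem.List.pyRange 1 (nant + 1) 1).foldl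
      (fun (s : Int × List Int) j => (s.1 + j, s.2 ++ [s.1 + j])) (-1, ([] : List Int))
  let auto_bls := st.2
  if casa then
    let nbls := PySem.Int.floordiv (nant * (nant + 1)) 2
    let auto_bls := auto_bls.map (fun aidx => (nbls - 1) - aidx)
    auto_bls.reverse  -- auto_bls[::-1]; exact by PySem.List.slice?_none_none_neg_one
  else auto_bls

-- ===== PORT B =====
def get_autobl_indices_alt (nant : Int) (casa : Bool) : List Int :=
  if casa then
    (PySem.List.pyRange 0 nant 1).map
      (fun m => m * nant - PySem.Int.floordiv (m * (m - 1)) 2)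
  else
    (PySem.List.pyRange 1 (nant + 1) 1).map
      (fun j => PySem.Int.floordiv (j * (j + 1)) 2 - 1)

-- ===== PRECONDITION & SPEC =====
def Spec_get_autobl_indices (nant : Int) (casa : Bool) (out : List Int) : Prop := out = get_autobl_indices_alt nant casa
instance (nant : Int) (casa : Bool) (out : List Int) : Decidable (Spec_get_autobl_indices nant casa out) := by unfold Spec_get_autobl_indices; infer_instance

-- ===== CLAIM (what is proved, stated in full; the proofs are below) =====
def Claim_equal_get_autobl_indices : Prop := ∀ (nant : Int) (casa : Bool), Dom_get_autobl_indices nant casa → Spec_get_autobl_indices nant casa (get_autobl_indices nant casa)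

-- ===== LEMMAS AND PROOFS =====

-- A's loop over 1..n produces (triangular n - 1, [j*(j+1)/2 - 1 for j in 1..n]).
lemma foldA_eq (n : Nat) :
    (PySem.List.pyRange 1 ((n : Int) + 1) 1).foldl
      (fun (s : Int × List Int) j => (s.1 + j, s.2 ++ [s.1 + j])) (-1, ([] : List Int))
    = ((n : Int) * (n + 1) / 2 - 1,
       (PySem.List.pyRange 1 ((n : Int) + 1) 1).map (fun j => j * (j + 1) / 2 - 1)) := by
  induction n with
  | zero =>
      rw [PySem.List.pyRange_one_eq_nil (by omega)]
      simp
  | succ n ih =>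
      have hsplit : PySem.List.pyRange 1 ((n : Int) + 1 + 1) 1
          = PySem.List.pyRange 1 ((n : Int) + 1) 1 ++ [(n : Int) + 1] := by
        have := PySem.List.pyRange_one_succ_right (a := 1) (b := (n : Int) + 1) (by omega)
        simpa using this
      have harith : (n : Int) * (n + 1) / 2 - 1 + ((n : Int) + 1)
          = ((n : Int) + 1) * ((n : Int) + 1 + 1) / 2 - 1 := by
        have h1 : (2 : Int) ∣ (n : Int) * ((n : Int) + 1) := (Int.even_mul_succ_self (n : Int)).two_dvd
        have h2 : ((n : Int) + 1) * ((n : Int) + 1 + 1)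
            = (n : Int) * ((n : Int) + 1) + 2 * ((n : Int) + 1) := by ring
        omega
      push_cast
      rw [hsplit, List.foldl_append, ih]
      simp only [List.foldl_cons, List.foldl_nil, List.map_append, List.map_cons,
        List.map_nil, harith]

-- pointwise identity for the CASA case: with j = n - k (0 ≤ k < n),
-- (T(n) - 1) - (j*(j+1)/2 - 1) = k*n - k*(k-1)/2.
lemma casa_pointwise (n k : Int) (_hk0 : 0 ≤ k) (_hkn : k < n) :
    (n * (n + 1) / 2 - 1) - ((n - k) * (n - k + 1) / 2 - 1)
      = k * n - k * (k - 1) / 2 := by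
  have hA : (2 : Int) ∣ n * (n + 1) := (Int.even_mul_succ_self n).two_dvd
  have hB : (2 : Int) ∣ (n - k) * (n - k + 1) := (Int.even_mul_succ_self (n - k)).two_dvd
  have hC : (2 : Int) ∣ k * (k - 1) := by
    have := (Int.even_mul_succ_self (k - 1)).two_dvd
    have h : (k - 1) * (k - 1 + 1) = k * (k - 1) := by ring
    rwa [h] at this
  have hrel : n * (n + 1) - (n - k) * (n - k + 1) = 2 * (k * n) - k * (k - 1) := by
    ring
  generalize k * n = p at hrel ⊢
  omega

set_option maxHeartbeats 800000 in
theorem pv_main (nant : Int) (casa : Bool) :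
    get_autobl_indices nant casa = get_autobl_indices_alt nant casa := by
  unfold get_autobl_indices get_autobl_indices_alt
  rcases (by omega : nant ≤ 0 ∨ 0 < nant) with hneg | hpos
  · -- empty ranges on both sides
    rw [PySem.List.pyRange_one_eq_nil (a := 1) (b := nant + 1) (by omega),
        PySem.List.pyRange_one_eq_nil (a := 0) (b := nant) (by omega)]
    cases casa <;> simp
  · obtain ⟨n, rfl⟩ : ∃ m : Nat, nant = (m : Int) :=
      ⟨nant.toNat, (Int.toNat_of_nonneg (le_of_lt hpos)).symm⟩
    rw [foldA_eq n]
    cases casa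
    · simp
    · simp only [PySem.Int.floordiv_eq_ediv_of_pos (by norm_num : (0:Int) < 2)]
      apply List.ext_getElem
      · simp [PySem.List.length_pyRange_one]
      · intro k h1 h2
        have hlenA : (PySem.List.pyRange 1 ((n : Int) + 1) 1).length = n := by
          simp [PySem.List.length_pyRange_one]
        have hlenB : (PySem.List.pyRange 0 (n : Int) 1).length = n := by
          simp only [PySem.List.length_pyRange_one]; omega
        have hkn : k < n := by first | exact h2 | simpa [hlenB] using h2
        simp only [if_true, List.getElem_reverse, List.getElem_map, List.length_map]
        rw [PySem.List.getElem_pyRange_one, PySem.List.getElem_pyRange_one]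
        have hidx : (1 : Int) + ((PySem.List.pyRange 1 ((n : Int) + 1) 1).length - 1 - k : Nat)
            = (n : Int) - k := by
          rw [hlenA]; omega
        rw [hidx]
        have := casa_pointwise (n : Int) (k : Int) (by positivity) (by exact_mod_cast hkn)
        simpa using this

-- ===== VERDICT (by name: the statement is the Claim_ definition above) =====
theorem get_autobl_indices_spec : Claim_equal_get_autobl_indices := by
  intro nant casa _
  exact pv_main nant casa
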